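-- pv_equiv track=rewrite | github.com/abdel792/forPython | forPython/__init__.py | getStringsPos
-- ===== SOURCE A (Python) =====
-- def getStringsPos(s):
-- 	# renvoi les limites des chaînes string et commentaires déclarées dans le texte en paramètre.
-- 	# suppose que la syntaxe du texte est correcte.
-- 	lst = []
-- 	k = - 1
-- 	prev = ""
-- 	quote = ""
-- 	inQuote = False
-- 	litteral = False
-- 	d, f = 0, 0
-- 	i = 0
-- 	n = len(s)
-- 	while(i < n):
-- 		e = s[i]
-- 		if inQuote == False:
-- 			if e == "'" or e == '"':
-- 				quote = e
-- 				inQuote = True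
-- 				if i > 0 and s[i - 1] == "r": literal = True
-- 				else: literral = False
-- 				d = i
-- 			elif e == "#": # début de commentaire
-- 				# on prend jusqu'à la fin de la ligne ou du texte
-- 				d = i
-- 				for k in range(i, n):
-- 					if s[k] == "\r" or s[k] == "\n":
-- 						k = k - 1
-- 						break
-- 					# end if
-- 				# end for
-- 				i = k # avancement
-- 				f = k
-- 				lst.append((d, f))
-- 			# end if
-- 		else: # inQuote==True
-- 			if e == quote:
-- 				if prev == "\\" and litteral == True:
-- 					prev = e
-- 					i = i + 1
-- 					continue
-- 				elif prev == "\\" and litteral == False: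
-- 					k = i - 1
-- 					s2 = ""
-- 					while(k >= 0):
-- 						if s[k] == "\\": s2 = s2 + "\\"
-- 						else: break
-- 						k = k - 1
-- 					# end while
-- 					# ici, si le nombre d'antislashes comptés est un multiple de 2
-- 					if len(s2) % 2 == 0:
-- 						inQuote = False
-- 						quote = ""
-- 						f = i
-- 						lst.append((d, f))
-- 					# end if
-- 				else: # simple fermeture de guillemets
-- 					inQuote = False
-- 					quote = ""
-- 					f = i
-- 					lst.append((d, f))
-- 				# end if fin test plusieurs possibilités pour le quote
-- 			# end if fin si quote
-- 		# end if fin si inQuote ou pas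
-- 		prev = e
-- 		i = i + 1
-- 	# end while
-- 	return lst
-- ===== SOURCE B (Python) =====
-- def _line_end(s, i):
--     # index of the first '\r' or '\n' at or after i, or len(s) if none
--     j = i
--     n = len(s)
--     while j < n and s[j] != '\r' and s[j] != '\n':
--         j += 1
--     return j
--
-- def getStringsPos(s):
--     res = []
--     n = len(s)
--     i = 0
--     while i < n:
--         c = s[i]
--         if c == '#':
--             j = _line_end(s, i)
--             res.append((i, j - 1))
--             i = j
--         elif c == "'" or c == '"':
--             start = i
--             escaped = False
--             i += 1
--             while i < n:
--                 ch = s[i]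
--                 if escaped:
--                     escaped = False
--                 elif ch == '\\':
--                     escaped = True
--                 elif ch == c:
--                     res.append((start, i))
--                     break
--                 i += 1
--             i += 1
--         else:
--             i += 1
--     return res
-- ===== Notes on version B (the rewrite author's own statement) =====
-- stated objective: simpler
-- what changed: Replaced A's single flag-state machine (prev/quote/inQuote/dead-litteral state with a backward backslash-counting inner while at each closing quote) by a nested-loop tokenizer: an inner forward scan per string literal maintaining a running escaped boolean, and a line-end helper for comments; the dead r-prefix handling is dropped.
import Mathlib
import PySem

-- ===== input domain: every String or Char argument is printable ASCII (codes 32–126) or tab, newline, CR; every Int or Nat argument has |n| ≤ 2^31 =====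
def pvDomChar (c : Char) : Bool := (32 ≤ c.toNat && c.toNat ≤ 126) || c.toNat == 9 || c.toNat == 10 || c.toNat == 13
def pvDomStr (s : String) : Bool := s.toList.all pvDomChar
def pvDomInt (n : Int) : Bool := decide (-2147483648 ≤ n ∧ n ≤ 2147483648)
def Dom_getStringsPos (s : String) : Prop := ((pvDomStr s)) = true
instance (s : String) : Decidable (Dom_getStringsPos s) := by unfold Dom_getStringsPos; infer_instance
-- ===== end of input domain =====

-- B replaces A's flag state machine (backward backslash-counting at each closing quote) by a
-- nested-loop tokenizer with a running `escaped` boolean; objective: simpler.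
-- (Loops are ported with a structural fuel counter, a pure totality guard: each Python
-- iteration advances the index by at least 1, so fuel > n - i never runs out.)

-- ===== PORT A =====
-- inner `for k in range(i, n)` of the comment branch: returns Python's final k
-- (k-1 at the first '\r'/'\n', else n-1 when the loop runs out); called with fuel = n - k
def pvA_commentEnd (cs : List Char) (n : Nat) : Nat → Nat → Nat
  | 0, _ => n - 1
  | fuel + 1, k =>
    if k < n then
      if cs.getD k ' ' = '\r' ∨ cs.getD k ' ' = '\n' then k - 1
      else pvA_commentEnd cs n fuel (k + 1)
    else n - 1

-- inner `while k >= 0` backslash counter: length of Python's s2 (count of consecutive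
-- backslashes ending at index k; only called with k = i-1, i ≥ 1)
def pvA_bsCount (cs : List Char) : Nat → Nat
  | 0 => if cs.getD 0 ' ' = '\\' then 1 else 0
  | k + 1 => if cs.getD (k + 1) ' ' = '\\' then 1 + pvA_bsCount cs k else 0

-- the outer while-loop of A; state = (lst, prev, quote, inQuote, litteral, d, i).
-- (`litteral` is never set: Python's assignments hit misspelled, unused locals
-- `literal`/`literral`, so the `if i > 0 and s[i-1] == "r"` guard has no effect; it
-- only binds dead names and is carried here as this comment.)
def pvA_loop (cs : List Char) (n : Nat) :
    Nat → List (Int × Int) → String → String → Bool → Bool → Nat → Nat → List (Int × Int)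
  | 0, lst, _, _, _, _, _, _ => lst
  | fuel + 1, lst, prev, quote, inQuote, litteral, d, i =>
    if i < n then
      -- e := s[i]
      if inQuote = false then
        if cs.getD i ' ' = '\'' ∨ cs.getD i ' ' = '"' then
          pvA_loop cs n fuel lst (String.ofList [cs.getD i ' ']) (String.ofList [cs.getD i ' '])
            true litteral i (i + 1)
        else if cs.getD i ' ' = '#' then
          pvA_loop cs n fuel
            (lst ++ [((i : Int), (pvA_commentEnd cs n (n - i) i : Int))])
            (String.ofList [cs.getD i ' ']) quote false litteral i
            (pvA_commentEnd cs n (n - i) i + 1)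
        else
          pvA_loop cs n fuel lst (String.ofList [cs.getD i ' ']) quote false litteral d (i + 1)
      else
        if String.ofList [cs.getD i ' '] = quote then
          if prev = "\\" ∧ litteral = true then
            pvA_loop cs n fuel lst (String.ofList [cs.getD i ' ']) quote true litteral d (i + 1)
          else if prev = "\\" ∧ litteral = false then
            if pvA_bsCount cs (i - 1) % 2 = 0 then
              pvA_loop cs n fuel (lst ++ [((d : Int), (i : Int))])
                (String.ofList [cs.getD i ' ']) "" false litteral d (i + 1)
            else
              pvA_loop cs n fuel lst (String.ofList [cs.getD i ' ']) quote true litteral d (i + 1)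
          else
            pvA_loop cs n fuel (lst ++ [((d : Int), (i : Int))])
              (String.ofList [cs.getD i ' ']) "" false litteral d (i + 1)
        else
          pvA_loop cs n fuel lst (String.ofList [cs.getD i ' ']) quote true litteral d (i + 1)
    else lst

def getStringsPos (s : String) : List (Int × Int) :=
  pvA_loop s.toList s.toList.length (s.toList.length + 1) [] "" "" false false 0 0

-- ===== PORT B =====
-- Source B `_line_end`: index of the first '\r'/'\n' at or after j, else n; fuel = n - j
def pvB_lineEnd (cs : List Char) (n : Nat) : Nat → Nat → Nat
  | 0, j => j
  | fuel + 1, j =>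
    if j < n ∧ cs.getD j ' ' ≠ '\r' ∧ cs.getD j ' ' ≠ '\n' then pvB_lineEnd cs n fuel (j + 1)
    else j

-- Source B inner string loop: some j = the index at which the loop breaks (closing quote),
-- none = the loop runs off the end of the text (unterminated literal)
def pvB_strScan (cs : List Char) (n : Nat) (q : Char) : Nat → Bool → Nat → Option Nat
  | 0, _, _ => none
  | fuel + 1, escaped, i =>
    if i < n then
      if escaped then pvB_strScan cs n q fuel false (i + 1)
      else if cs.getD i ' ' = '\\' then pvB_strScan cs n q fuel true (i + 1)
      else if cs.getD i ' ' = q then some i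
      else pvB_strScan cs n q fuel false (i + 1)
    else none

-- Source B outer while-loop
def pvB_loop (cs : List Char) (n : Nat) : Nat → Nat → List (Int × Int) → List (Int × Int)
  | 0, _, res => res
  | fuel + 1, i, res =>
    if i < n then
      if cs.getD i ' ' = '#' then
        pvB_loop cs n fuel (pvB_lineEnd cs n (n - i) i)
          (res ++ [((i : Int), (pvB_lineEnd cs n (n - i) i : Int) - 1)])
      else if cs.getD i ' ' = '\'' ∨ cs.getD i ' ' = '"' then
        match pvB_strScan cs n (cs.getD i ' ') (n - i) false (i + 1) with
        | some j => pvB_loop cs n fuel (j + 1) (res ++ [((i : Int), (j : Int))])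
        | none => res
      else pvB_loop cs n fuel (i + 1) res
    else res

def getStringsPos_alt (s : String) : List (Int × Int) :=
  pvB_loop s.toList s.toList.length (s.toList.length + 1) 0 []

-- ===== PRECONDITION & SPEC =====
def Spec_getStringsPos (s : String) (out : List (Int × Int)) : Prop := out = getStringsPos_alt s
instance (s : String) (out : List (Int × Int)) : Decidable (Spec_getStringsPos s out) := by unfold Spec_getStringsPos; infer_instance

-- ===== CLAIM (what is proved, stated in full; the proofs are below) =====
def Claim_equal_getStringsPos : Prop := ∀ (s : String), Dom_getStringsPos s → Spec_getStringsPos s (getStringsPos s)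

-- ===== LEMMAS AND PROOFS =====

theorem pv_ofList_single_inj (c d : Char) : (String.ofList [c] = String.ofList [d]) ↔ c = d := by
  constructor
  · intro h; have := congrArg String.toList h; simpa using this
  · intro h; subst h; rfl

theorem pv_ofList_backslash (c : Char) : (String.ofList [c] = "\\") ↔ c = '\\' := by
  constructor
  · intro h; have := congrArg String.toList h; simpa using this
  · intro h; subst h; rfl

theorem pv_bsCount_zero (cs : List Char) (k : Nat) (h : cs.getD k ' ' ≠ '\\') :
    pvA_bsCount cs k = 0 := by
  cases k <;> simp only [pvA_bsCount] <;> rw [if_neg h]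

theorem pv_bsCount_succ (cs : List Char) (i : Nat) (hi : 1 ≤ i) (h : cs.getD i ' ' = '\\') :
    pvA_bsCount cs i = 1 + pvA_bsCount cs (i - 1) := by
  obtain ⟨k, rfl⟩ : ∃ k, i = k + 1 := ⟨i - 1, by omega⟩
  simp only [pvA_bsCount, Nat.add_sub_cancel]
  rw [if_pos h]

theorem pv_le_lineEnd (cs : List Char) (n : Nat) :
    ∀ f j, j ≤ pvB_lineEnd cs n f j := by
  intro f
  induction f with
  | zero => intro j; simp [pvB_lineEnd]
  | succ f ih =>
    intro j
    rw [pvB_lineEnd]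
    split
    · have := ih (j + 1); omega
    · omega

-- A's comment scan stops one before B's line-end scan (both called with exact fuel n - k)
theorem pv_comment_lineEnd (cs : List Char) (n : Nat) :
    ∀ f k, f = n - k → 1 ≤ k → k ≤ n →
      pvA_commentEnd cs n f k + 1 = pvB_lineEnd cs n f k := by
  intro f
  induction f with
  | zero =>
    intro k hf hk1 hkn
    have : k = n := by omega
    subst this
    simp only [pvA_commentEnd, pvB_lineEnd]
    omega
  | succ f ih =>
    intro k hf hk1 hkn
    have hlt : k < n := by omega
    rw [pvA_commentEnd, if_pos hlt, pvB_lineEnd]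
    by_cases hnl : cs.getD k ' ' = '\r' ∨ cs.getD k ' ' = '\n'
    · rw [if_pos hnl, if_neg (by tauto)]
      omega
    · rw [if_neg hnl, if_pos ⟨hlt, by tauto, by tauto⟩]
      exact ih (k + 1) (by omega) (by omega) (by omega)

-- proof-only helper: the value of B's outer loop after the inner string scan returns
def pvB_afterScan (cs : List Char) (n fuel : Nat) (res : List (Int × Int)) (start : Nat) :
    Option Nat → List (Int × Int)
  | some j => pvB_loop cs n fuel (j + 1) (res ++ [((start : Int), (j : Int))])
  | none => res

theorem pvB_loop_end (cs : List Char) (n : Nat) (f i : Nat) (res : List (Int × Int))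
    (h : ¬ i < n) : pvB_loop cs n f i res = res := by
  cases f
  · rfl
  · rw [pvB_loop, if_neg h]

theorem pvB_loop_hash (cs : List Char) (n f i : Nat) (res : List (Int × Int)) (hlt : i < n)
    (hc : cs.getD i ' ' = '#') :
    pvB_loop cs n (f + 1) i res =
      pvB_loop cs n f (pvB_lineEnd cs n (n - i) i)
        (res ++ [((i : Int), (pvB_lineEnd cs n (n - i) i : Int) - 1)]) := by
  rw [pvB_loop, if_pos hlt, if_pos hc]

theorem pvB_loop_quote (cs : List Char) (n f i : Nat) (res : List (Int × Int)) (hlt : i < n)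
    (hc : cs.getD i ' ' ≠ '#') (hq : cs.getD i ' ' = '\'' ∨ cs.getD i ' ' = '"') :
    pvB_loop cs n (f + 1) i res =
      pvB_afterScan cs n f res i (pvB_strScan cs n (cs.getD i ' ') (n - i) false (i + 1)) := by
  rw [pvB_loop, if_pos hlt, if_neg hc, if_pos hq]
  cases pvB_strScan cs n (cs.getD i ' ') (n - i) false (i + 1) <;> rfl

theorem pvB_loop_other (cs : List Char) (n f i : Nat) (res : List (Int × Int)) (hlt : i < n)
    (hc : cs.getD i ' ' ≠ '#') (hq : ¬ (cs.getD i ' ' = '\'' ∨ cs.getD i ' ' = '"')) :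
    pvB_loop cs n (f + 1) i res = pvB_loop cs n f (i + 1) res := by
  rw [pvB_loop, if_pos hlt, if_neg hc, if_neg hq]

theorem pvA_loop_end (cs : List Char) (n f : Nat) (lst : List (Int × Int))
    (prev quote : String) (inQ litt : Bool) (d i : Nat) (h : ¬ i < n) :
    pvA_loop cs n f lst prev quote inQ litt d i = lst := by
  cases f
  · rfl
  · rw [pvA_loop, if_neg h]

-- the simultaneous loop invariant: outside a string literal A's machine tracks B's outer
-- loop; inside one (opened at d, quote q, A's prev = the previous character, B's escaped
-- flag = parity of the backslash run ending just before i) A's machine tracks B's inner scan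
theorem pv_main (cs : List Char) (n : Nat) :
    ∀ m i, n - i = m →
      (∀ fa fb lst prev quote d, n - i < fa → n - i < fb →
        pvA_loop cs n fa lst prev quote false false d i = pvB_loop cs n fb i lst) ∧
      (∀ fa fs fb lst d (q : Char) (esc : Bool), n - i < fa → n - i ≤ fs → n - i ≤ fb →
        q ≠ '\\' → 1 ≤ i → esc = decide (pvA_bsCount cs (i - 1) % 2 = 1) →
        pvA_loop cs n fa lst (String.ofList [cs.getD (i - 1) ' ']) (String.ofList [q])
            true false d i =
          pvB_afterScan cs n fb lst d (pvB_strScan cs n q fs esc i)) := by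
  intro m
  induction m using Nat.strong_induction_on with
  | _ m ih =>
    intro i hm
    by_cases hlt : i < n
    case neg =>
      constructor
      · intro fa fb lst prev quote d _ _
        rw [pvA_loop_end cs n fa lst prev quote false false d i hlt,
          pvB_loop_end cs n fb i lst hlt]
      · intro fa fs fb lst d q esc _ _ _ _ _ _
        rw [pvA_loop_end cs n fa _ _ _ _ _ _ _ hlt]
        cases fs
        · rfl
        · rw [pvB_strScan, if_neg hlt]; rfl
    case pos =>
      constructor
      · -- OUT: inQuote = false tracks B's outer loop
        intro fa fb lst prev quote d hfa hfb
        obtain ⟨fa, rfl⟩ : ∃ f, fa = f + 1 := ⟨fa - 1, by omega⟩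
        obtain ⟨fb, rfl⟩ : ∃ f, fb = f + 1 := ⟨fb - 1, by omega⟩
        rw [pvA_loop, if_pos hlt, if_pos rfl]
        by_cases hq : cs.getD i ' ' = '\'' ∨ cs.getD i ' ' = '"'
        · have hc : cs.getD i ' ' ≠ '#' := by rcases hq with h | h <;> rw [h] <;> decide
          rw [if_pos hq, pvB_loop_quote cs n fb i lst hlt hc hq]
          have hbs : pvA_bsCount cs i = 0 :=
            pv_bsCount_zero cs i (by rcases hq with h | h <;> rw [h] <;> decide)
          exact (ih (n - (i + 1)) (by omega) (i + 1) rfl).2 fa (n - i) fb lst i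
            (cs.getD i ' ') false (by omega) (by omega) (by omega)
            (by rcases hq with h | h <;> rw [h] <;> decide) (by omega)
            (by show false = decide (pvA_bsCount cs i % 2 = 1); rw [hbs]; decide)
        · rw [if_neg hq]
          by_cases hh : cs.getD i ' ' = '#'
          · rw [if_pos hh, pvB_loop_hash cs n fb i lst hlt hh]
            have hk1 : pvA_commentEnd cs n (n - i) i + 1 = pvB_lineEnd cs n (n - i) i := by
              obtain ⟨f, hf⟩ : ∃ f, n - i = f + 1 := ⟨n - i - 1, by omega⟩
              rw [hf, pvA_commentEnd, if_pos hlt, if_neg (by rw [hh]; decide),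
                pvB_lineEnd, if_pos ⟨hlt, by rw [hh]; decide, by rw [hh]; decide⟩]
              exact pv_comment_lineEnd cs n f (i + 1) (by omega) (by omega) (by omega)
            have hge : i + 1 ≤ pvB_lineEnd cs n (n - i) i := by
              obtain ⟨f, hf⟩ : ∃ f, n - i = f + 1 := ⟨n - i - 1, by omega⟩
              rw [hf, pvB_lineEnd, if_pos ⟨hlt, by rw [hh]; decide, by rw [hh]; decide⟩]
              exact pv_le_lineEnd cs n f (i + 1)
            have ev : ((pvB_lineEnd cs n (n - i) i : Int) - 1) =
                (pvA_commentEnd cs n (n - i) i : Int) := by omega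
            rw [ev, ← hk1]
            exact (ih (n - (pvA_commentEnd cs n (n - i) i + 1)) (by omega)
              (pvA_commentEnd cs n (n - i) i + 1) rfl).1 fa fb _ _ _ _ (by omega) (by omega)
          · rw [if_neg hh, pvB_loop_other cs n fb i lst hlt hh hq]
            exact (ih (n - (i + 1)) (by omega) (i + 1) rfl).1 fa fb lst _ quote d
              (by omega) (by omega)
      · -- IN: inside a string literal, A tracks B's inner scan
        intro fa fs fb lst d q esc hfa hfs hfb hq hi hesc
        obtain ⟨fa, rfl⟩ : ∃ f, fa = f + 1 := ⟨fa - 1, by omega⟩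
        obtain ⟨fs, rfl⟩ : ∃ f, fs = f + 1 := ⟨fs - 1, by omega⟩
        rw [pvA_loop, if_pos hlt, if_neg (by simp), pvB_strScan, if_pos hlt]
        by_cases heq : cs.getD i ' ' = q
        · rw [if_pos ((pv_ofList_single_inj _ _).2 heq), if_neg (by simp)]
          have hbs0 : pvA_bsCount cs i = 0 := pv_bsCount_zero cs i (by rw [heq]; exact hq)
          by_cases hb : cs.getD (i - 1) ' ' = '\\'
          · rw [if_pos ⟨(pv_ofList_backslash _).2 hb, rfl⟩]
            by_cases hpar : pvA_bsCount cs (i - 1) % 2 = 0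
            · -- even backslash run: the quote closes in both programs
              rw [if_pos hpar]
              have hescf : esc = false := by rw [hesc]; simp; omega
              rw [hescf, if_neg (by simp), if_neg (by rw [heq]; exact hq), if_pos heq]
              show _ = pvB_loop cs n fb (i + 1) (lst ++ [((d : Int), (i : Int))])
              exact (ih (n - (i + 1)) (by omega) (i + 1) rfl).1 fa fb _ _ _ _
                (by omega) (by omega)
            · -- odd run: the quote is escaped, both stay inside the literal
              rw [if_neg hpar]
              have hesct : esc = true := by rw [hesc]; simp; omega
              rw [hesct, if_pos rfl]
              exact (ih (n - (i + 1)) (by omega) (i + 1) rfl).2 fa fs fb lst d q false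
                (by omega) (by omega) (by omega) hq (by omega)
                (by show false = decide (pvA_bsCount cs i % 2 = 1); rw [hbs0]; decide)
          · -- previous char not a backslash: simple close in both programs
            rw [if_neg (fun h => hb ((pv_ofList_backslash _).1 h.1))]
            have hescf : esc = false := by
              rw [hesc, pv_bsCount_zero cs (i - 1) hb]; decide
            rw [hescf, if_neg (by simp), if_neg (by rw [heq]; exact hq), if_pos heq]
            show _ = pvB_loop cs n fb (i + 1) (lst ++ [((d : Int), (i : Int))])
            exact (ih (n - (i + 1)) (by omega) (i + 1) rfl).1 fa fb _ _ _ _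
              (by omega) (by omega)
        · -- not the quote character: both advance, the escape parity stays in sync
          rw [if_neg (fun h => heq ((pv_ofList_single_inj _ _).1 h))]
          have step : ∀ esc' : Bool, esc' = decide (pvA_bsCount cs i % 2 = 1) →
              pvA_loop cs n fa lst (String.ofList [cs.getD i ' ']) (String.ofList [q])
                  true false d (i + 1) =
                pvB_afterScan cs n fb lst d (pvB_strScan cs n q fs esc' (i + 1)) :=
            fun esc' h' => (ih (n - (i + 1)) (by omega) (i + 1) rfl).2 fa fs fb lst d q esc'
              (by omega) (by omega) (by omega) hq (by omega) h'
          cases hev : esc with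
          | true =>
            rw [if_pos rfl]
            rw [hev] at hesc
            refine step false ?_
            by_cases hbi : cs.getD i ' ' = '\\'
            · rw [pv_bsCount_succ cs i hi hbi]
              simp at hesc ⊢
              omega
            · rw [pv_bsCount_zero cs i hbi]; decide
          | false =>
            rw [if_neg (by simp)]
            rw [hev] at hesc
            by_cases hbi : cs.getD i ' ' = '\\'
            · rw [if_pos hbi]
              refine step true ?_
              rw [pv_bsCount_succ cs i hi hbi]
              simp at hesc ⊢
              omega
            · rw [if_neg hbi, if_neg heq]
              exact step false (by rw [pv_bsCount_zero cs i hbi]; decide)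

-- ===== VERDICT (by name: the statement is the Claim_ definition above) =====
theorem getStringsPos_spec : Claim_equal_getStringsPos := by
  intro s _
  unfold Spec_getStringsPos getStringsPos getStringsPos_alt
  exact (pv_main s.toList s.toList.length (s.toList.length - 0) 0 rfl).1
    (s.toList.length + 1) (s.toList.length + 1) [] "" "" 0 (by omega) (by omega)
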